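-- pv_equiv track=rewrite | github.com/Alvin-Furman-CS-Classroom/project-2-ai-system-bases-loaded-with-knowledge | clean_baseball_reference_data.py | parse_position_code
-- ===== SOURCE A (Python) =====
-- def parse_position_code(pos_code):
--     """
--     Parse baseball-reference position code to our format.
--
--     Position codes:
--     1 = Pitcher (P) - we don't use this
--     2 = Catcher (C)
--     3 = First Base (1B)
--     4 = Second Base (2B)
--     5 = Third Base (3B)
--     6 = Shortstop (SS)
--     7 = Left Field (LF)
--     8 = Center Field (CF)
--     9 = Right Field (RF)
--     H = Multiple positions
--     D = Designated Hitter (we don't use this)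
--
--     Examples:
--     *3 = Primary position 1B
--     *8/H = Primary CF, also plays other positions
--     2HD = Catcher, also plays other positions
--     /2 = Backup catcher
--     """
--     if not pos_code or pos_code == '' or pos_code == '-9999':
--         return []
--
--     positions = []
--     pos_code = pos_code.strip()
--
--     # Remove asterisk (indicates primary position)
--     pos_code = pos_code.replace('*', '')
--
--     # Split by / to handle multiple position groups
--     parts = pos_code.split('/')
--
--     for part in parts:
--         # Remove D (DH) and H (multiple) indicators
--         part = part.replace('D', '').replace('H', '')
--
--         # Extract position numbers
--         for char in part:
--             if char == '1':
--                 # Skip pitchers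
--                 continue
--             elif char == '2':
--                 if 'C' not in positions:
--                     positions.append('C')
--             elif char == '3':
--                 if '1B' not in positions:
--                     positions.append('1B')
--             elif char == '4':
--                 if '2B' not in positions:
--                     positions.append('2B')
--             elif char == '5':
--                 if '3B' not in positions:
--                     positions.append('3B')
--             elif char == '6':
--                 if 'SS' not in positions:
--                     positions.append('SS')
--             elif char == '7':
--                 if 'LF' not in positions:
--                     positions.append('LF')
--             elif char == '8':
--                 if 'CF' not in positions:
--                     positions.append('CF')
--             elif char == '9':
--                 if 'RF' not in positions:
--                     positions.append('RF')
--
--     return positions if positions else []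
-- ===== SOURCE B (Python) =====
-- _POSITIONS = (('2', 'C'), ('3', '1B'), ('4', '2B'), ('5', '3B'),
--               ('6', 'SS'), ('7', 'LF'), ('8', 'CF'), ('9', 'RF'))
--
--
-- def parse_position_code(pos_code):
--     if not pos_code or pos_code == '' or pos_code == '-9999':
--         return []
--     cleaned = pos_code.strip().replace('*', '')
--     # for each possible position, locate the first occurrence of its digit,
--     # then order the positions found by that index
--     found = [(cleaned.find(digit), label)
--              for digit, label in _POSITIONS if digit in cleaned]
--     found.sort(key=lambda entry: entry[0])
--     return [label for _, label in found]
-- ===== Notes on version B (the rewrite author's own statement) =====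
-- stated objective: alternative
-- what changed: A scans the cleaned string character by character, dispatching each digit through an if/elif chain and appending its label unless already collected; B instead, for each of the eight positions, finds the first index of its digit in the cleaned string (str.find), then sorts the positions found by that index and emits their labels.
import Mathlib
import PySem

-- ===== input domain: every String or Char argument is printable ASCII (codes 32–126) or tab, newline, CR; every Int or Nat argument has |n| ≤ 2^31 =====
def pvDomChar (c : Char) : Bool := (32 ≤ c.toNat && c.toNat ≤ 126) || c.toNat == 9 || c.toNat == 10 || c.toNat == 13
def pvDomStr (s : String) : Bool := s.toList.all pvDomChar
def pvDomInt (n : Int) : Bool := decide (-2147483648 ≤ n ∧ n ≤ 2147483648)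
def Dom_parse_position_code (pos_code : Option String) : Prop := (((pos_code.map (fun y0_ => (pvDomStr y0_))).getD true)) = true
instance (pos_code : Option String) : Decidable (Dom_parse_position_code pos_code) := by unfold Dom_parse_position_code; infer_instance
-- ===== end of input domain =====

-- B replaces A's character-by-character scan with dedup-on-append by a different algorithm:
-- for each of the eight positions it finds the first index of its digit in the cleaned string,
-- then sorts the positions found by that index (alternative decomposition, similar cost).

-- ===== PORT A =====
-- the body of A's inner 'for char in part' loop: the if/elif chain with membership checks
def pvInnerStepA (positions : List String) (char : Char) : List String :=
  if char = '1' then positions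
  else if char = '2' then (if positions.contains "C" then positions else positions ++ ["C"])
  else if char = '3' then (if positions.contains "1B" then positions else positions ++ ["1B"])
  else if char = '4' then (if positions.contains "2B" then positions else positions ++ ["2B"])
  else if char = '5' then (if positions.contains "3B" then positions else positions ++ ["3B"])
  else if char = '6' then (if positions.contains "SS" then positions else positions ++ ["SS"])
  else if char = '7' then (if positions.contains "LF" then positions else positions ++ ["LF"])
  else if char = '8' then (if positions.contains "CF" then positions else positions ++ ["CF"])
  else if char = '9' then (if positions.contains "RF" then positions else positions ++ ["RF"])
  else positions

def parse_position_code (pos_code : Option String) : List String :=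
  match pos_code with
  | none => []                                -- 'not pos_code' on None
  | some s =>
    if s = "" ∨ s = "-9999" then []           -- 'not pos_code or pos_code == "" or pos_code == "-9999"'
    else
      let cleaned := PySem.Str.replace (PySem.Str.strip s) "*" ""
      let parts := PySem.Chars.splitOn cleaned.toList ['/']
      parts.foldl (fun positions part =>
        let part := PySem.Chars.replace (PySem.Chars.replace part ['D'] []) ['H'] []
        part.foldl pvInnerStepA positions) []

-- ===== PORT B =====
-- Source B's _POSITIONS table
def pvTable : List (Char × String) :=
  [('2', "C"), ('3', "1B"), ('4', "2B"), ('5', "3B"),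
   ('6', "SS"), ('7', "LF"), ('8', "CF"), ('9', "RF")]

def parse_position_code_alt (pos_code : Option String) : List String :=
  match pos_code with
  | none => []
  | some s =>
    if s = "" ∨ s = "-9999" then []
    else
      let cleaned := (PySem.Str.replace (PySem.Str.strip s) "*" "").toList
      -- found = [(cleaned.find(digit), label) for digit, label in _POSITIONS if digit in cleaned]
      let found := pvTable.filterMap (fun dl =>
        if PySem.Chars.isIn [dl.1] cleaned then some (PySem.Chars.find cleaned [dl.1], dl.2)
        else none)
      -- found.sort(key=lambda entry: entry[0]); return [label for _, label in found]
      (PySem.List.sorted found (fun e => e.1)).map (fun e => e.2)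

-- ===== PRECONDITION & SPEC =====
def Spec_parse_position_code (pos_code : Option String) (out : List String) : Prop := out = parse_position_code_alt pos_code
instance (pos_code : Option String) (out : List String) : Decidable (Spec_parse_position_code pos_code out) := by unfold Spec_parse_position_code; infer_instance

-- ===== CLAIM (what is proved, stated in full; the proofs are below) =====
def Claim_equal_parse_position_code : Prop := ∀ (pos_code : Option String), Dom_parse_position_code pos_code → Spec_parse_position_code pos_code (parse_position_code pos_code)

-- ===== LEMMAS AND PROOFS =====

-- proof-side label map of A's if/elif chain, and its inverse
def pvPosMap (c : Char) : Option String :=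
  if c = '2' then some "C"
  else if c = '3' then some "1B"
  else if c = '4' then some "2B"
  else if c = '5' then some "3B"
  else if c = '6' then some "SS"
  else if c = '7' then some "LF"
  else if c = '8' then some "CF"
  else if c = '9' then some "RF"
  else none

def pvDigitOf (l : String) : Char :=
  if l = "C" then '2' else if l = "1B" then '3' else if l = "2B" then '4'
  else if l = "3B" then '5' else if l = "SS" then '6' else if l = "LF" then '7'
  else if l = "CF" then '8' else '9'

-- ---- A's fold = ordered dedup of the mapped characters ----

-- first-occurrence dedup of a label list, continued from an accumulator
def pvG (acc : List String) (ls : List String) : List String := ls.foldl PySem.Set.add acc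

set_option maxHeartbeats 1000000 in
lemma pvInnerStepA_eq (acc : List String) (c : Char) :
    pvInnerStepA acc c = match pvPosMap c with
      | none => acc
      | some l => PySem.Set.add acc l := by
  simp only [pvInnerStepA, pvPosMap, PySem.Set.add, PySem.Set.contains]
  split_ifs <;> simp_all

lemma foldl_innerStep_eq_pvG : ∀ (cs : List Char) (acc : List String),
    cs.foldl pvInnerStepA acc = pvG acc (cs.filterMap pvPosMap) := by
  intro cs
  induction cs with
  | nil => intro acc; rfl
  | cons c t ih =>
    intro acc
    simp only [List.foldl_cons, List.filterMap_cons, pvInnerStepA_eq]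
    cases h : pvPosMap c with
    | none => simpa using ih acc
    | some l => simp [pvG, ih]

lemma filterMap_replace_go (d : Char) (hd : pvPosMap d = none) :
    ∀ (fuel : Nat) (l acc : List Char), l.length ≤ fuel →
      (PySem.Chars.replace.go [d] [] fuel l acc).filterMap pvPosMap =
        acc.reverse.filterMap pvPosMap ++ l.filterMap pvPosMap := by
  intro fuel
  induction fuel with
  | zero =>
    intro l acc _
    simp [PySem.Chars.replace.go]
  | succ n ih =>
    intro l acc hlen
    cases l with
    | nil => simp [PySem.Chars.replace.go]
    | cons c t =>
      simp only [PySem.Chars.replace.go]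
      by_cases hc : c = d
      · subst hc
        have hpre : [c].isPrefixOf (c :: t) = true := by simp [List.isPrefixOf]
        simp only [hpre, if_true, List.length_cons, List.drop_succ_cons, List.length_nil, List.drop_zero,
          List.reverse_nil, List.nil_append]
        rw [ih t acc (by simpa using Nat.le_of_succ_le_succ hlen)]
        simp [hd]
      · have hpre : [d].isPrefixOf (c :: t) = false := by
          simp [List.isPrefixOf]; exact fun h => absurd h.symm hc
        simp only [hpre, Bool.false_eq_true, if_false]
        rw [ih t (c :: acc) (by simpa using Nat.le_of_succ_le_succ hlen)]
        cases h : pvPosMap c <;> simp [List.filterMap_append, h]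

lemma filterMap_replace (d : Char) (hd : pvPosMap d = none) (l : List Char) :
    (PySem.Chars.replace l [d] []).filterMap pvPosMap = l.filterMap pvPosMap := by
  have : ([d] : List Char).isEmpty = false := rfl
  simp only [PySem.Chars.replace, this, Bool.false_eq_true, if_false]
  simpa using filterMap_replace_go d hd l.length l [] le_rfl

lemma filterMap_splitOn_go :
    ∀ (fuel : Nat) (l cur : List Char) (acc : List (List Char)), l.length ≤ fuel →
      ((PySem.Chars.splitOn.go ['/'] fuel l cur acc).map (List.filterMap pvPosMap)).flatten =
        (acc.reverse.map (List.filterMap pvPosMap)).flatten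
          ++ cur.reverse.filterMap pvPosMap ++ l.filterMap pvPosMap := by
  intro fuel
  induction fuel with
  | zero =>
    intro l cur acc _
    simp [PySem.Chars.splitOn.go, List.filterMap_append]
  | succ n ih =>
    intro l cur acc hlen
    cases l with
    | nil => simp [PySem.Chars.splitOn.go]
    | cons c t =>
      simp only [PySem.Chars.splitOn.go]
      by_cases hc : c = '/'
      · subst hc
        have hpre : ['/'].isPrefixOf ('/' :: t) = true := by simp [List.isPrefixOf]
        simp only [hpre, if_true, List.length_cons, List.drop_succ_cons, List.length_nil, List.drop_zero]
        rw [ih t [] (cur.reverse :: acc) (by simpa using Nat.le_of_succ_le_succ hlen)]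
        have  hslash : pvPosMap '/' = none := rfl
        simp [hslash]
      · have hpre : ['/'].isPrefixOf (c :: t) = false := by
          simp [List.isPrefixOf]; exact fun h => absurd h.symm hc
        simp only [hpre, Bool.false_eq_true, if_false]
        rw [ih t (c :: cur) acc (by simpa using Nat.le_of_succ_le_succ hlen)]
        cases h : pvPosMap c <;> simp [List.filterMap_append, h]

lemma filterMap_splitOn (cs : List Char) :
    ((PySem.Chars.splitOn cs ['/']).map (List.filterMap pvPosMap)).flatten =
      cs.filterMap pvPosMap := by
  simpa using filterMap_splitOn_go (cs.length + 1) cs [] [] (Nat.le_succ _)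

lemma pvG_append (acc : List String) (xs ys : List String) :
    pvG acc (xs ++ ys) = pvG (pvG acc xs) ys := by
  simp [pvG]

lemma foldl_pvG_flatten : ∀ (parts : List (List String)) (init : List String),
    parts.foldl pvG init = pvG init parts.flatten := by
  intro parts
  induction parts with
  | nil => intro init; rfl
  | cons p t ih => intro init; simp [List.foldl_cons, ih, pvG_append]

lemma pvA_eq_dedup (cs : List Char) :
    (PySem.Chars.splitOn cs ['/']).foldl (fun positions part =>
        (PySem.Chars.replace (PySem.Chars.replace part ['D'] []) ['H'] []).foldl
          pvInnerStepA positions) []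
      = PySem.List.dedup (cs.filterMap pvPosMap) := by
  have hD : pvPosMap 'D' = none := rfl
  have hH : pvPosMap 'H' = none := rfl
  calc (PySem.Chars.splitOn cs ['/']).foldl (fun positions part =>
          (PySem.Chars.replace (PySem.Chars.replace part ['D'] []) ['H'] []).foldl
            pvInnerStepA positions) []
      = (PySem.Chars.splitOn cs ['/']).foldl
          (fun positions part => pvG positions (part.filterMap pvPosMap)) [] := by
        simp only [foldl_innerStep_eq_pvG, filterMap_replace 'H' hH,
          filterMap_replace 'D' hD]
    _ = ((PySem.Chars.splitOn cs ['/']).map (List.filterMap pvPosMap)).foldl pvG [] := by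
        rw [List.foldl_map]
    _ = pvG [] (cs.filterMap pvPosMap) := by
        rw [foldl_pvG_flatten, filterMap_splitOn]
    _ = PySem.List.dedup (cs.filterMap pvPosMap) := rfl

-- ---- table facts ----

set_option maxHeartbeats 1000000 in
lemma posMap_eq_some_iff (c : Char) (l : String) :
    pvPosMap c = some l ↔ (c, l) ∈ pvTable := by
  unfold pvPosMap pvTable
  split_ifs <;> simp_all <;> exact eq_comm

lemma dig_of_table : ∀ p ∈ pvTable, pvDigitOf p.2 = p.1 := by decide

lemma table_snd_nodup : (pvTable.map Prod.snd).Nodup := by decide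

-- ---- single-character find/isIn facts ----

lemma singleton_infix_iff (d : Char) (cs : List Char) : [d] <:+: cs ↔ d ∈ cs := by
  constructor
  · intro h; exact h.subset (by simp)
  · intro h
    obtain ⟨u, v, huv⟩ := List.append_of_mem h
    exact ⟨u, v, by simp [huv]⟩

lemma prefix_drop_singleton (d : Char) (cs : List Char) (j : Nat) (hj : j < cs.length)
    (h : cs[j] = d) : [d] <+: cs.drop j := by
  rw [List.drop_eq_getElem_cons hj, h]
  exact ⟨cs.drop (j + 1), rfl⟩

lemma find_singleton (d : Char) (cs : List Char) (h : d ∈ cs) :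
    PySem.Chars.find cs [d] = (List.idxOf d cs : Int) := by
  have h0 : 0 ≤ PySem.Chars.find cs [d] :=
    (PySem.Chars.find_nonneg_iff cs [d]).mpr ((singleton_infix_iff d cs).mpr h)
  obtain ⟨hpre, hmin⟩ := PySem.Chars.find_spec h0
  set k := (PySem.Chars.find cs [d]).toNat with hk
  have hklen : k ≤ cs.length := by
    have := PySem.Chars.find_le_length cs [d]
    omega
  -- cs.drop k starts with d
  obtain ⟨t, ht⟩ := List.cons_prefix_iff.mp hpre
  obtain ⟨ht1, _⟩ := ht
  -- d does not occur before k
  have hnot : d ∉ cs.take k := by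
    intro hmem
    obtain ⟨j, hj, hget⟩ := List.mem_iff_getElem.mp hmem
    have hjk : j < k := lt_of_lt_of_le hj (by simp)
    have hjlen : j < cs.length := lt_of_lt_of_le hjk hklen
    exact hmin j hjk (prefix_drop_singleton d cs j hjlen (by
      simpa [List.getElem_take] using hget))
  have hidx : List.idxOf d cs = k := by
    conv_lhs => rw [← List.take_append_drop k cs]
    rw [List.idxOf_append, if_neg hnot, ht1, List.idxOf_cons_self]
    simp [List.length_take]
    omega
  rw [hidx]
  omega

-- ---- B's found list is nodup ----

lemma nodup_found (cs : List Char) :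
    ∀ (T : List (Char × String)), (T.map Prod.snd).Nodup →
      (T.filterMap (fun dl =>
        if PySem.Chars.isIn [dl.1] cs then some (PySem.Chars.find cs [dl.1], dl.2)
        else none)).Nodup := by
  intro T
  induction T with
  | nil => intro _; simp
  | cons p T ih =>
    intro hnd
    rw [List.map_cons, List.nodup_cons] at hnd
    by_cases hin : PySem.Chars.isIn [p.1] cs
    · simp only [List.filterMap_cons, hin, if_true]
      rw [List.nodup_cons]
      refine ⟨?_, ih hnd.2⟩
      intro hmem
      obtain ⟨q, hq, hsome⟩ := List.mem_filterMap.mp hmem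
      by_cases hin2 : PySem.Chars.isIn [q.1] cs
      · rw [if_pos hin2] at hsome
        have h1 : (PySem.Chars.find cs [q.1], q.2) = (PySem.Chars.find cs [p.1], p.2) :=
          Option.some.inj hsome
        have h2 : q.2 = p.2 := (Prod.ext_iff.mp h1).2
        exact hnd.1 (h2 ▸ List.mem_map_of_mem hq)
      · rw [if_neg hin2] at hsome
        simp at hsome
    · simp only [List.filterMap_cons, hin, Bool.false_eq_true, if_false]
      exact ih hnd.2

-- ---- membership of the dedup ----

lemma mem_D_iff (cs : List Char) (l : String) :
    l ∈ PySem.List.dedup (cs.filterMap pvPosMap) ↔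
      (pvDigitOf l, l) ∈ pvTable ∧ pvDigitOf l ∈ cs := by
  rw [PySem.List.mem_dedup, List.mem_filterMap]
  constructor
  · rintro ⟨c, hc, hm⟩
    have ht : (c, l) ∈ pvTable := (posMap_eq_some_iff c l).mp hm
    have hd : pvDigitOf l = c := dig_of_table (c, l) ht
    exact ⟨hd ▸ ht, hd ▸ hc⟩
  · rintro ⟨ht, hc⟩
    exact ⟨pvDigitOf l, hc, (posMap_eq_some_iff _ _).mpr ht⟩

-- ---- order of the dedup = order of first occurrence of the digits ----

lemma pvOrd_inv (cs : List Char) : ∀ (v u : List Char) (acc : List String),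
    cs = u ++ v →
    (∀ l ∈ acc, ∃ c ∈ u, pvPosMap c = some l) →
    (∀ c ∈ u, ∀ l, pvPosMap c = some l → l ∈ acc) →
    acc.Pairwise (fun l1 l2 => List.idxOf (pvDigitOf l1) cs < List.idxOf (pvDigitOf l2) cs) →
    ((v.filterMap pvPosMap).foldl PySem.Set.add acc).Pairwise
      (fun l1 l2 => List.idxOf (pvDigitOf l1) cs < List.idxOf (pvDigitOf l2) cs) := by
  intro v
  induction v with
  | nil => intro u acc _ _ _ h3; simpa using h3
  | cons c v ih =>
    intro u acc hcs h1 h2 h3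
    rw [List.filterMap_cons]
    cases hc : pvPosMap c with
    | none =>
      refine ih (u ++ [c]) acc (by simpa using hcs) ?_ ?_ h3
      · intro l hl; obtain ⟨c', hc', hm⟩ := h1 l hl; exact ⟨c', by simp [hc'], hm⟩
      · intro c' hc' l hm
        rcases List.mem_append.mp hc' with h | h
        · exact h2 c' h l hm
        · have : c' = c := by simpa using h
          rw [this, hc] at hm; simp at hm
    | some l0 =>
      rw [List.foldl_cons]
      by_cases hl : l0 ∈ acc
      · have hadd : PySem.Set.add acc l0 = acc := by
          simp [PySem.Set.add, PySem.Set.contains, hl]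
        rw [hadd]
        refine ih (u ++ [c]) acc (by simpa using hcs) ?_ ?_ h3
        · intro l hla; obtain ⟨c', hc', hm⟩ := h1 l hla; exact ⟨c', by simp [hc'], hm⟩
        · intro c' hc' l hm
          rcases List.mem_append.mp hc' with h | h
          · exact h2 c' h l hm
          · have hcc : c' = c := by simpa using h
            rw [hcc, hc] at hm
            rw [← Option.some.inj hm]; exact hl
      · have hadd : PySem.Set.add acc l0 = acc ++ [l0] := by
          simp [PySem.Set.add, PySem.Set.contains, hl]
        rw [hadd]
        have htab : (c, l0) ∈ pvTable := (posMap_eq_some_iff c l0).mp hc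
        have hdig : pvDigitOf l0 = c := dig_of_table (c, l0) htab
        have hcnotu : c ∉ u := fun hcu => hl (h2 c hcu l0 hc)
        have hidx0 : List.idxOf c cs = u.length := by
          rw [hcs, List.idxOf_append, if_neg hcnotu, List.idxOf_cons_self]
          simp
        have hkey : ∀ l ∈ acc,
            List.idxOf (pvDigitOf l) cs < List.idxOf (pvDigitOf l0) cs := by
          intro l hla
          obtain ⟨c', hc'u, hm⟩ := h1 l hla
          have htab' : (c', l) ∈ pvTable := (posMap_eq_some_iff c' l).mp hm
          have hd' : pvDigitOf l = c' := dig_of_table (c', l) htab'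
          rw [hd', hdig, hidx0, hcs, List.idxOf_append, if_pos hc'u]
          exact List.idxOf_lt_length_of_mem hc'u
        refine ih (u ++ [c]) (acc ++ [l0]) (by simpa using hcs) ?_ ?_ ?_
        · intro l hla
          rcases List.mem_append.mp hla with h | h
          · obtain ⟨c', hc', hm⟩ := h1 l h; exact ⟨c', by simp [hc'], hm⟩
          · have : l = l0 := by simpa using h
            exact ⟨c, by simp, this ▸ hc⟩
        · intro c' hc' l hm
          rcases List.mem_append.mp hc' with h | h
          · exact List.mem_append_left _ (h2 c' h l hm)
          · have hcc : c' = c := by simpa using h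
            rw [hcc, hc] at hm
            simp [← Option.some.inj hm]
        · rw [List.pairwise_append]
          exact ⟨h3, by simp, by intro a ha b hb; rw [List.mem_singleton] at hb; exact hb ▸ hkey a ha⟩

lemma pvOrd (cs : List Char) :
    (PySem.List.dedup (cs.filterMap pvPosMap)).Pairwise
      (fun l1 l2 => List.idxOf (pvDigitOf l1) cs < List.idxOf (pvDigitOf l2) cs) := by
  have hd : PySem.List.dedup (cs.filterMap pvPosMap)
      = (cs.filterMap pvPosMap).foldl PySem.Set.add [] := rfl
  rw [hd]
  exact pvOrd_inv cs cs [] [] rfl (by simp) (by simp) (by simp)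

-- ---- main bridge: B's sort-by-first-index = A's ordered dedup ----

lemma pvMain (cs : List Char) :
    (PySem.List.sorted (pvTable.filterMap (fun dl =>
        if PySem.Chars.isIn [dl.1] cs then some (PySem.Chars.find cs [dl.1], dl.2)
        else none)) (fun e => e.1)).map (fun e => e.2)
      = PySem.List.dedup (cs.filterMap pvPosMap) := by
  set D := PySem.List.dedup (cs.filterMap pvPosMap) with hD
  set f : String → Int × String := fun l => ((List.idxOf (pvDigitOf l) cs : Int), l) with hf
  set found := pvTable.filterMap (fun dl =>
        if PySem.Chars.isIn [dl.1] cs then some (PySem.Chars.find cs [dl.1], dl.2)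
        else none) with hfound
  have hinj : Function.Injective f := by
    intro a b h; exact congrArg Prod.snd h
  have hnd' : (D.map f).Nodup := (PySem.List.nodup_dedup _).map hinj
  have hndf : found.Nodup := nodup_found cs pvTable table_snd_nodup
  have hmem : ∀ x, x ∈ D.map f ↔ x ∈ found := by
    intro x
    rw [List.mem_map, hfound, List.mem_filterMap]
    constructor
    · rintro ⟨l, hl, hx⟩
      obtain ⟨ht, hcm⟩ := (mem_D_iff cs l).mp hl
      refine ⟨(pvDigitOf l, l), ht, ?_⟩
      rw [if_pos (by rw [PySem.Chars.isIn_iff_infix]; exact (singleton_infix_iff _ _).mpr hcm)]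
      rw [← hx, hf]
      simp [find_singleton _ _ hcm]
    · rintro ⟨dl, hdl, hsome⟩
      split at hsome
      · rename_i hin
        have hcm : dl.1 ∈ cs := (singleton_infix_iff _ _).mp
          ((PySem.Chars.isIn_iff_infix _ _).mp hin)
        have hmD : dl.2 ∈ D := by
          rw [mem_D_iff]
          have hd : pvDigitOf dl.2 = dl.1 := dig_of_table dl hdl
          exact ⟨by rw [hd]; exact hdl, by rw [hd]; exact hcm⟩
        refine ⟨dl.2, hmD, ?_⟩
        rw [hf]
        have hd : pvDigitOf dl.2 = dl.1 := dig_of_table dl hdl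
        rw [← Option.some.inj hsome]
        simp [hd, find_singleton _ _ hcm]
      · simp at hsome
  have hperm : (D.map f).Perm found :=
    (List.perm_ext_iff_of_nodup hnd' hndf).mpr hmem
  have hpair : (D.map f).Pairwise (fun a b => (fun e : Int × String => e.1) a < (fun e : Int × String => e.1) b) := by
    refine List.Pairwise.map f ?_ (pvOrd cs)
    intro a b hab
    simpa [hf] using Int.ofNat_lt.mpr hab
  have hsorted : PySem.List.sorted found (fun e => e.1) = D.map f :=
    PySem.List.sorted_eq_of_perm_of_pairwise_lt found (D.map f) (fun e => e.1) hperm hpair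
  rw [hsorted, List.map_map]
  have hid : ((fun e : Int × String => e.2) ∘ f) = id := rfl
  rw [hid, List.map_id]

-- ===== VERDICT (by name: the statement is the Claim_ definition above) =====
theorem parse_position_code_spec : Claim_equal_parse_position_code := by
  intro pos_code _
  unfold Spec_parse_position_code
  cases pos_code with
  | none => rfl
  | some s =>
    simp only [parse_position_code, parse_position_code_alt]
    by_cases hg : s = "" ∨ s = "-9999"
    · simp [hg]
    · simp only [hg, if_false]
      rw [pvA_eq_dedup, pvMain]
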